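-- pv_equiv track=rewrite | github.com/openview2017/leetcode-group-solution | Interview Questions/OA/Amazon/Count decreasing subarray/Solution.py | getSubarrayCount
-- ===== SOURCE A (Python) =====
-- def getSubarrayCount(array):
--     cur_len = 0
--     result = 0
--     for i in range(len(array)):
--         if i == 0 or array[i] < array[i-1]:
--             cur_len += 1
--         else:
--             result += (cur_len+1) * cur_len // 2
--             cur_len = 1
--     result += (cur_len+1) * cur_len // 2
--     return result
-- ===== SOURCE B (Python) =====
-- def getSubarrayCount(array):
--     result = 0
--     cur = 0
--     prev = None
--     for x in array:
--         cur = cur + 1 if prev is None or x < prev else 1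
--         result += cur
--         prev = x
--     return result
-- ===== Notes on version B (the rewrite author's own statement) =====
-- stated objective: simpler
-- what changed: B drops A's run-boundary triangular formula (cur+1)*cur//2 and post-loop flush, instead adding the current decreasing-run length to the result on every element.
import Mathlib
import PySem

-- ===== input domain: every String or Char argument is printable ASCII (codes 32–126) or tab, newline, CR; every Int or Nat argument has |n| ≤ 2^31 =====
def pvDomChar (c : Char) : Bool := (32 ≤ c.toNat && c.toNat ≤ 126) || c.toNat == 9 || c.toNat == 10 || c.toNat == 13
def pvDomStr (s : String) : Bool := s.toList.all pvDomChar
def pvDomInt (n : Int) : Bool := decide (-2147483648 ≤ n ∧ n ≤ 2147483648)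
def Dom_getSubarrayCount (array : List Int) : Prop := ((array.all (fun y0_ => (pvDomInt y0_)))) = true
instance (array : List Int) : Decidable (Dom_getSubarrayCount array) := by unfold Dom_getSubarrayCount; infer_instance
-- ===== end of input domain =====

-- B replaces A's run-boundary triangular add (cur+1)*cur//2 + final flush by adding the
-- current decreasing-run length to the result at every element (objective: simpler).


-- ===== PORT A =====
-- loop body of A: state (cur_len, result), index i
def aStep (array : List Int) (s : Int × Int) (i : Int) : Int × Int :=
  if i = 0 ∨ PySem.List.pyGetD array i 0 < PySem.List.pyGetD array (i - 1) 0 then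
    (s.1 + 1, s.2)
  else
    (1, s.2 + PySem.Int.floordiv ((s.1 + 1) * s.1) 2)

def getSubarrayCount (array : List Int) : Int :=
  let s := (PySem.List.pyRange 0 (array.length : Int) 1).foldl (aStep array) (0, 0)
  s.2 + PySem.Int.floordiv ((s.1 + 1) * s.1) 2

-- ===== PORT B =====
-- loop of B: for x in array, keeping prev, cur, result
def altGo : List Int → Option Int → Int → Int → Int
  | [], _, _, res => res
  | x :: rest, prev, cur, res =>
    let cur' := if (match prev with | none => true | some p => decide (x < p)) then cur + 1 else 1
    altGo rest (some x) cur' (res + cur')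

def getSubarrayCount_alt (array : List Int) : Int := altGo array none 0 0

-- ===== PRECONDITION & SPEC =====
def Spec_getSubarrayCount (array : List Int) (out : Int) : Prop := out = getSubarrayCount_alt array
instance (array : List Int) (out : Int) : Decidable (Spec_getSubarrayCount array out) := by unfold Spec_getSubarrayCount; infer_instance

-- ===== CLAIM (what is proved, stated in full; the proofs are below) =====
def Claim_equal_getSubarrayCount : Prop := ∀ (array : List Int), Dom_getSubarrayCount array → Spec_getSubarrayCount array (getSubarrayCount array)

-- ===== LEMMAS AND PROOFS =====
def tri (c : Int) : Int := PySem.Int.floordiv ((c + 1) * c) 2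

lemma tri_step (c : Int) : tri (c + 1) = tri c + (c + 1) := by
  unfold tri
  rw [PySem.Int.floordiv_eq_ediv_of_pos (by norm_num),
      PySem.Int.floordiv_eq_ediv_of_pos (by norm_num)]
  have h : (c + 1 + 1) * (c + 1) = (c + 1) * c + (c + 1) * 2 := by ring
  rw [h, Int.add_mul_ediv_right _ _ (by norm_num)]

lemma tri_one : tri 1 = 1 := by decide

-- structural form of A's loop: same state transitions, driven by the list with the previous element
def aGo : List Int → Option Int → Int × Int → Int × Int
  | [], _, s => s
  | x :: rest, prev, s =>
    aGo rest (some x)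
      (if (match prev with | none => true | some p => decide (x < p)) then (s.1 + 1, s.2)
       else (1, s.2 + tri s.1))

lemma bridge : ∀ (rest pre : List Int) (s : Int × Int),
    (PySem.List.pyRange (pre.length : Int) ((pre.length + rest.length : Nat) : Int) 1).foldl
      (aStep (pre ++ rest)) s = aGo rest pre.getLast? s := by
  intro rest
  induction rest with
  | nil =>
    intro pre s
    simp [PySem.List.pyRange_one_eq_nil, aGo]
  | cons x rest ih =>
    intro pre s
    have hlt : (pre.length : Int) < ((pre.length + (x :: rest).length : Nat) : Int) := by
      simp only [List.length_cons]; push_cast; omega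
    rw [PySem.List.pyRange_one_cons hlt, List.foldl_cons]
    have hx : PySem.List.pyGetD (pre ++ x :: rest) (pre.length : Int) 0 = x := by
      simp [PySem.List.pyGetD_natCast, List.getD]
    have hstep : aStep (pre ++ x :: rest) s (pre.length : Int) =
        (if (match pre.getLast? with | none => true | some p => decide (x < p)) then (s.1 + 1, s.2)
         else (1, s.2 + tri s.1)) := by
      cases hpre : pre with
      | nil => simp [aStep]
      | cons y ys =>
        have hne : (y :: ys) ≠ ([] : List Int) := by simp
        have hprev : PySem.List.pyGetD (y :: ys ++ x :: rest) ((((y :: ys).length : Int)) - 1) 0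
            = (y :: ys).getLast hne := by
          have hcast : (((y :: ys).length : Int)) - 1 = (((y :: ys).length - 1 : Nat) : Int) := by
            push_cast [List.length_cons]; omega
          rw [hcast, PySem.List.pyGetD_natCast]
          have hlen : (y :: ys).length - 1 < (y :: ys).length := by simp
          rw [List.getD_eq_getElem?_getD, List.getElem?_append_left hlen,
              List.getElem?_eq_getElem hlen, List.getLast_eq_getElem]
          simp
        subst hpre
        rw [aStep, hx, hprev]
        have h0 : ¬ (((y :: ys).length : Int) = 0) := by simp only [List.length_cons]; push_cast; omega
        rw [List.getLast?_eq_some_getLast hne]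
        by_cases hc : x < (y :: ys).getLast hne
        · simp [h0, hc]
        · simp [hc, tri]
          intro habs
          exact absurd habs (by omega)
    rw [hstep]
    have harr : pre ++ x :: rest = (pre ++ [x]) ++ rest := by simp
    have hlen1 : (pre.length : Int) + 1 = (((pre ++ [x]).length : Nat) : Int) := by simp
    have hlen2 : ((pre.length + (x :: rest).length : Nat) : Int)
        = (((pre ++ [x]).length + rest.length : Nat) : Int) := by simp; omega
    rw [harr, hlen1, hlen2, ih (pre ++ [x])]
    simp only [List.getLast?_concat]
    rfl

lemma final_eq : ∀ (rest : List Int) (prev : Option Int) (cur res : Int),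
    (aGo rest prev (cur, res)).2 + tri (aGo rest prev (cur, res)).1
      = altGo rest prev cur (res + tri cur) := by
  intro rest
  induction rest with
  | nil => intro prev cur res; simp [aGo, altGo]
  | cons x rest ih =>
    intro prev cur res
    by_cases hc : (match prev with | none => true | some p => decide (x < p)) = true
    · show (aGo rest (some x) _).2 + tri (aGo rest (some x) _).1 = altGo rest (some x) _ _
      simp only [hc, if_true]
      rw [ih, tri_step]
      ring_nf
    · show (aGo rest (some x) _).2 + tri (aGo rest (some x) _).1 = altGo rest (some x) _ _
      simp only [hc, if_false, Bool.false_eq_true]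
      rw [ih, tri_one]

-- ===== VERDICT (by name: the statement is the Claim_ definition above) =====
theorem getSubarrayCount_spec : Claim_equal_getSubarrayCount := by
  intro array _
  unfold Spec_getSubarrayCount getSubarrayCount getSubarrayCount_alt
  have h := bridge array [] (0, 0)
  simp only [List.length_nil, List.nil_append, Nat.zero_add, List.getLast?_nil,
    Nat.cast_zero] at h
  simp only [Nat.cast_zero] at h ⊢
  rw [h,
    show PySem.Int.floordiv (((aGo array none (0, 0)).1 + 1) * (aGo array none (0, 0)).1) 2
      = tri (aGo array none (0, 0)).1 from rfl,
    final_eq]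
  norm_num [tri]
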